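-- pv_equiv track=rewrite | github.com/DavidCoenFish/game05 | tools/python/drag_drop_ww_cpp_style/abstract_syntax_tree/dsc_token2.py | IsEscapedStringComplete
-- ===== SOURCE A (Python) =====
-- def IsEscapedStringComplete(in_string):
--     prev_was_escape = False
--     last_was_true_quote = False
--     for c in in_string[1:]:
--         if True == prev_was_escape:
--             prev_was_escape = False
--         elif c == "\\":
--             prev_was_escape = True
--         elif c == "\"":
--             last_was_true_quote = True
--
--     return last_was_true_quote
-- ===== SOURCE B (Python) =====
-- import re
--
-- def IsEscapedStringComplete(in_string):
--     # Stage 1: delete every escape pair (backslash + the one char it escapes).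
--     # Stage 2: the literal is complete iff an (unescaped) quote survives.
--     stripped = re.sub(r'\\.', '', in_string[1:], flags=re.DOTALL)
--     return '"' in stripped
-- ===== Notes on version B (the rewrite author's own statement) =====
-- stated objective: idiomatic
-- what changed: Replaces A's stateful single-pass scan (two boolean flags) by a two-stage pipeline: a regex substitution first deletes every escape pair '\'+char, then a plain substring membership test checks whether a double-quote survives.
import Mathlib
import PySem

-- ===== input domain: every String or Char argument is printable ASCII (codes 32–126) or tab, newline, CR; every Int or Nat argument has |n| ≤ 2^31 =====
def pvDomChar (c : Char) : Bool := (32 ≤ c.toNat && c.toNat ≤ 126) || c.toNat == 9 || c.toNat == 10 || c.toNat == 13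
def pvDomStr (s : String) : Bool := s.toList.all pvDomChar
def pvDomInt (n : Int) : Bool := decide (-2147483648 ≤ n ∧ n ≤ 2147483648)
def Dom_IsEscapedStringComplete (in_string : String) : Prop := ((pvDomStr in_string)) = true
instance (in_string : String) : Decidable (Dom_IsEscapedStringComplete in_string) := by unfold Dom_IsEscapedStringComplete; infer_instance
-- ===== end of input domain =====

-- B replaces A's stateful scan by a two-stage pipeline: strip escape pairs, then a membership test (idiomatic; same O(n) cost).

-- ===== PORT A =====
-- A: fold over in_string[1:] carrying (prev_was_escape, last_was_true_quote); returns the second flag.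
def IsEscapedStringComplete (in_string : String) : Bool :=
  ((in_string.toList.drop 1).foldl
    (fun (st : Bool × Bool) c =>
      if st.1 = true then (false, st.2)
      else if c = '\\' then (true, st.2)
      else if c = '"' then (st.1, true)
      else st) (false, false)).2

-- ===== PORT B =====
-- Stage 1, exact port of re.sub(r'\\.', '', s, re.DOTALL): delete non-overlapping
-- '\' + any-char pairs left to right (a trailing lone backslash has no match and stays).
def pvStripEsc : List Char → List Char
  | [] => []
  | c :: rest =>
    if c = '\\' then
      match rest with
      | [] => ['\\']
      | _ :: t => pvStripEsc t
    else c :: pvStripEsc rest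

-- Stage 2: '"' in stripped.
def IsEscapedStringComplete_alt (in_string : String) : Bool :=
  (pvStripEsc (in_string.toList.drop 1)).contains '"'

-- ===== PRECONDITION & SPEC =====
def Spec_IsEscapedStringComplete (in_string : String) (out : Bool) : Prop := out = IsEscapedStringComplete_alt in_string
instance (in_string : String) (out : Bool) : Decidable (Spec_IsEscapedStringComplete in_string out) := by unfold Spec_IsEscapedStringComplete; infer_instance

-- ===== CLAIM (what is proved, stated in full; the proofs are below) =====
def Claim_equal_IsEscapedStringComplete : Prop := ∀ (in_string : String), Dom_IsEscapedStringComplete in_string → Spec_IsEscapedStringComplete in_string (IsEscapedStringComplete in_string)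

-- ===== LEMMAS AND PROOFS =====

theorem pvStripEsc_backslash (rest : List Char) :
    ('"' ∈ pvStripEsc ('\\' :: rest)) ↔ ('"' ∈ pvStripEsc rest.tail) := by
  cases rest <;> simp [pvStripEsc]

theorem pvStripEsc_other (c : Char) (rest : List Char) (h : c ≠ '\\') :
    ('"' ∈ pvStripEsc (c :: rest)) ↔ (c = '"' ∨ '"' ∈ pvStripEsc rest) := by
  cases rest with
  | nil => simp [pvStripEsc, h, eq_comm]
  | cons d t => simp [pvStripEsc, h, eq_comm]

-- Loop invariant: A's fold from (prev, last) returns last OR-ed with B's two-stage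
-- answer on the remaining characters (prev = true ⇒ the first remaining char is escaped).
theorem pv_fold_eq (l : List Char) : ∀ (prev last : Bool),
    (l.foldl
      (fun (st : Bool × Bool) c =>
        if st.1 = true then (false, st.2)
        else if c = '\\' then (true, st.2)
        else if c = '"' then (st.1, true)
        else st) (prev, last)).2
      = (last || (if prev then (pvStripEsc l.tail).contains '"' else (pvStripEsc l).contains '"')) := by
  induction l with
  | nil => intro prev last; cases prev <;> simp [pvStripEsc]
  | cons c rest ih =>
    intro prev last
    cases prev with
    | true => simpa using ih false last
    | false =>
      by_cases h1 : c = '\\'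
      · simp [h1, ih true last, pvStripEsc_backslash rest]
      · by_cases h2 : c = '"'
        · simp [h1, h2, ih false true, pvStripEsc_other '"' rest (by decide)]
        · simp [h1, h2, ih false last, pvStripEsc_other c rest h1]

-- ===== VERDICT (by name: the statement is the Claim_ definition above) =====
theorem IsEscapedStringComplete_spec : Claim_equal_IsEscapedStringComplete := by
  intro s _
  unfold Spec_IsEscapedStringComplete IsEscapedStringComplete IsEscapedStringComplete_alt
  simpa using pv_fold_eq (s.toList.drop 1) false false
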